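-- pv_equiv track=rewrite | github.com/shank-p/python-programs | practical_number.py | check_divisor_sum
-- ===== SOURCE A (Python) =====
-- def check_divisor_sum(x: int, divisors: list) -> bool:
--     if not len(divisors):
--         return False
--     elif x in divisors:
--         return True
--     elif x > divisors[-1]:
--         return check_divisor_sum(x-divisors[-1], divisors[:-1])
--     elif x < divisors[-1]:
--         return check_divisor_sum(x, divisors[:-1])
--     else:
--         return False
-- ===== SOURCE B (Python) =====
-- def check_divisor_sum(x: int, divisors: list) -> bool:
--     k = len(divisors)
--     while True:
--         if k == 0:
--             return False
--         if x in divisors[:k]: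
--             return True
--         last = divisors[k - 1]
--         if x > last:
--             x -= last
--             k -= 1
--         elif x < last:
--             k -= 1
--         else:
--             return False
-- ===== Notes on version B (the rewrite author's own statement) =====
-- stated objective: alternative
-- what changed: The tail recursion with list slicing (divisors[:-1] copies on every step) is replaced by an explicit while loop over a descending index k, keeping the prefix-membership scan and never copying the list for the recursive step.
import Mathlib
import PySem

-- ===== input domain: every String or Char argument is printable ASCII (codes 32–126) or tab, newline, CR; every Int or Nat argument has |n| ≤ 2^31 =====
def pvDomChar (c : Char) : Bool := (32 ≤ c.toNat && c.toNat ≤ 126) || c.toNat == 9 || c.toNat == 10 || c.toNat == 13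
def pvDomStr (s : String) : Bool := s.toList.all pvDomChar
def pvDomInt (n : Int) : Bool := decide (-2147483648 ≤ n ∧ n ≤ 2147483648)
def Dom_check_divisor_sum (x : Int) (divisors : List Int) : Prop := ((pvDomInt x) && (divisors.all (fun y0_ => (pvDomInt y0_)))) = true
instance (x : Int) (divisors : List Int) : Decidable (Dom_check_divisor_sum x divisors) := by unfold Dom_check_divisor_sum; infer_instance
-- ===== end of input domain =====

-- B replaces A's tail recursion over sliced copies of the list by a while loop on a
-- descending index (alternative decomposition; same asymptotic cost).


-- ===== PORT A =====
def check_divisor_sum (x : Int) (divisors : List Int) : Bool :=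
  if divisors.length = 0 then false
  else if divisors.contains x then true
  else
    -- divisors[-1]; the list is nonempty here, so pyGet? is some
    let last := (PySem.List.pyGet? divisors (-1)).getD 0
    if x > last then check_divisor_sum (x - last) (PySem.List.slice divisors none (some (-1)))
    else if x < last then check_divisor_sum x (PySem.List.slice divisors none (some (-1)))
    else false
termination_by divisors.length
decreasing_by
  all_goals simp [PySem.List.slice_to_neg_one, List.length_dropLast]; omega

-- ===== PORT B =====
-- the while loop of Source B, with the loop counter k made explicit
def cds_loop (x : Int) (divisors : List Int) : Nat → Bool
  | 0 => false
  | k + 1 =>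
    if ((divisors.take (k + 1)).contains x) then true
    else
      let last := (PySem.List.pyGet? divisors ((k : Int) + 1 - 1)).getD 0
      if x > last then cds_loop (x - last) divisors k
      else if x < last then cds_loop x divisors k
      else false

def check_divisor_sum_alt (x : Int) (divisors : List Int) : Bool :=
  cds_loop x divisors divisors.length

-- ===== PRECONDITION & SPEC =====
def Spec_check_divisor_sum (x : Int) (divisors : List Int) (out : Bool) : Prop := out = check_divisor_sum_alt x divisors
instance (x : Int) (divisors : List Int) (out : Bool) : Decidable (Spec_check_divisor_sum x divisors out) := by unfold Spec_check_divisor_sum; infer_instance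

-- ===== CLAIM (what is proved, stated in full; the proofs are below) =====
def Claim_equal_check_divisor_sum : Prop := ∀ (x : Int) (divisors : List Int), Dom_check_divisor_sum x divisors → Spec_check_divisor_sum x divisors (check_divisor_sum x divisors)

-- ===== LEMMAS AND PROOFS =====

theorem cds_loop_eq (divisors : List Int) :
    ∀ (k : Nat), k ≤ divisors.length → ∀ (x : Int),
      cds_loop x divisors k = check_divisor_sum x (divisors.take k) := by
  intro k
  induction k with
  | zero => intro _ x; simp [cds_loop, check_divisor_sum]
  | succ k ih =>
    intro hk x
    have hk' : k ≤ divisors.length := Nat.le_of_succ_le hk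
    have hlen : (divisors.take (k + 1)).length = k + 1 := by
      simp [List.length_take]; omega
    have hkk : k < divisors.length := hk
    -- the last element of the prefix is divisors[k]
    have hlast : PySem.List.pyGet? (divisors.take (k + 1)) (-1)
        = PySem.List.pyGet? divisors ((k : Int) + 1 - 1) := by
      have h1 : ((k : Int) + 1 - 1) = ((k : Nat) : Int) := by push_cast; ring
      rw [h1, PySem.List.pyGet?_natCast, PySem.List.pyGet?_neg_one,
        List.getLast?_eq_getElem?, hlen]
      simp [List.getElem?_take]
    have hdrop : PySem.List.slice (divisors.take (k + 1)) none (some (-1)) = divisors.take k := by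
      rw [PySem.List.slice_to_neg_one, List.dropLast_eq_take, hlen, List.take_take]
      simp
    rw [check_divisor_sum]
    simp only [cds_loop, hlen, hlast, hdrop]
    rw [if_neg (Nat.succ_ne_zero k)]
    split
    · simp_all
    · split
      · rw [ih hk']
      · split
        · rw [ih hk']
        · rfl

-- ===== VERDICT (by name: the statement is the Claim_ definition above) =====
theorem check_divisor_sum_spec : Claim_equal_check_divisor_sum := by
  intro x divisors _
  unfold Spec_check_divisor_sum check_divisor_sum_alt
  rw [cds_loop_eq divisors divisors.length le_rfl x, List.take_length]
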